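-- pv_equiv track=rewrite | github.com/Redpike/advent-of-code | 2015/d03/d03.py | countHousesWithRobot
-- ===== SOURCE A (Python) =====
-- from collections import defaultdict
--
-- moves = {
--     '>': (1, 0),
--     'v': (0, -1),
--     '<': (-1, 0),
--     '^': (0, 1)
-- }
--
-- def countHousesWithRobot(input_data):
--     visited = defaultdict(int)
--     santa_curr_position = (0, 0)
--     robo_curr_position = (0, 0)
--     visited[santa_curr_position] = 0
--     counter = 0
--
--     for move in input_data:
--         move_cords = moves.get(move)
--
--         if counter % 2 == 0:
--             santa_curr_position = (santa_curr_position[0] + move_cords[0], santa_curr_position[1] + move_cords[1])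
--             visited[santa_curr_position] = visited[santa_curr_position]
--         else:
--             robo_curr_position = (robo_curr_position[0] + move_cords[0], robo_curr_position[1] + move_cords[1])
--             visited[robo_curr_position] = visited[robo_curr_position]
--         counter += 1
--
--     return len(visited)
-- ===== SOURCE B (Python) =====
-- moves = {
--     '>': (1, 0),
--     'v': (0, -1),
--     '<': (-1, 0),
--     '^': (0, 1)
-- }
--
--
-- def countHousesWithRobot(input_data):
--     # Collect every visited position into a plain list (origin first), consuming the
--     # moves two at a time (santa's, then robot's); then count distinct positions by
--     # sorting the list and scanning for adjacent changes -- no set or dict at all.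
--     pts = [(0, 0)]
--     sx = sy = rx = ry = 0
--     i = 0
--     n = len(input_data)
--     while i < n:
--         dx, dy = moves[input_data[i]]
--         sx += dx
--         sy += dy
--         pts.append((sx, sy))
--         if i + 1 < n:
--             dx, dy = moves[input_data[i + 1]]
--             rx += dx
--             ry += dy
--             pts.append((rx, ry))
--         i += 2
--     pts.sort()
--     count = 0
--     prev = None
--     for p in pts:
--         if p != prev:
--             count += 1
--             prev = p
--     return count
-- ===== Notes on version B (the rewrite author's own statement) =====
-- stated objective: alternative
-- what changed: A's alternating loop filling a defaultdict and returning its len is replaced by collecting every visited position into a plain list (consuming moves two at a time), then counting distinct positions by sorting the list and scanning for adjacent changes - no dict or set at all.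
-- outside the precondition, e.g. on countHousesWithRobot('ab'): A raises TypeError, B raises KeyError
import Mathlib
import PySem

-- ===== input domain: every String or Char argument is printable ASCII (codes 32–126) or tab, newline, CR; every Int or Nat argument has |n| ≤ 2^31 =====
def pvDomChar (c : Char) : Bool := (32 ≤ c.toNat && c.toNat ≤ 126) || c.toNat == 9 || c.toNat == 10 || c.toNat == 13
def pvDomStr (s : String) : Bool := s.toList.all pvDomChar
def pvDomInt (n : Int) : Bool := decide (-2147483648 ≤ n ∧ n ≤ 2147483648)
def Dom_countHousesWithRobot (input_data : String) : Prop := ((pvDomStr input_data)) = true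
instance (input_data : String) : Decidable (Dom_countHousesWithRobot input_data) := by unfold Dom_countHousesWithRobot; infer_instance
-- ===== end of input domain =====

-- B replaces A's alternating dict-filling loop by collecting every visited position into a
-- plain list (moves consumed two at a time) and counting distinct positions by sorting the
-- list and scanning adjacent changes (objective: alternative algorithm, no dict/set).

-- the module constant `moves`
def movesDict : PySem.Dict Char (Int × Int) :=
  ((((PySem.Dict.empty).insert '>' (1, 0)).insert 'v' (0, -1)).insert '<' (-1, 0)).insert '^' (0, 1)

-- ===== PORT A =====
-- one step of A's loop body; state = (visited, santa_curr_position, robo_curr_position, counter).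
-- `moves.get(move)` returns None on an invalid char and Python then raises TypeError on the
-- subscript: those inputs are outside Pre_; the port uses the harmless default (0,0) there.
def stepA (st : PySem.Dict (Int × Int) Int × (Int × Int) × (Int × Int) × Int) (move : Char) :
    PySem.Dict (Int × Int) Int × (Int × Int) × (Int × Int) × Int :=
  let visited := st.1
  let santa := st.2.1
  let robo := st.2.2.1
  let counter := st.2.2.2
  let mc := (movesDict.get? move).getD (0, 0)
  if PySem.Int.mod counter 2 = 0 then
    let santa' := (santa.1 + mc.1, santa.2 + mc.2)
    (visited.insert santa' (visited.getD santa' 0), santa', robo, counter + 1)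
  else
    let robo' := (robo.1 + mc.1, robo.2 + mc.2)
    (visited.insert robo' (visited.getD robo' 0), santa, robo', counter + 1)

def countHousesWithRobot (input_data : String) : Int :=
  let visited : PySem.Dict (Int × Int) Int := PySem.Dict.empty.insert (0, 0) 0
  let st := input_data.toList.foldl stepA (visited, (0, 0), (0, 0), 0)
  (PySem.Dict.size st.1 : Int)

-- ===== PORT B =====
-- `moves[c]`: KeyError on an invalid char is outside Pre_; the port defaults to (0,0) there.
def moveD (c : Char) : Int × Int := (movesDict.get? c).getD (0, 0)

-- B's while loop: consume the moves two at a time (santa's, then the robot's), appending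
-- each new position to the list.
def pathPairs : List Char → (Int × Int) → (Int × Int) → List (Int × Int)
  | [], _, _ => []
  | [c], s, _ => [(s.1 + (moveD c).1, s.2 + (moveD c).2)]
  | c1 :: c2 :: t, s, r =>
      let s' := (s.1 + (moveD c1).1, s.2 + (moveD c1).2)
      let r' := (r.1 + (moveD c2).1, r.2 + (moveD c2).2)
      s' :: r' :: pathPairs t s' r'

-- B's final scan: 'if p != prev: count += 1; prev = p' (prev starts as None)
def scanStep (st : Int × Option (Int × Int)) (p : Int × Int) : Int × Option (Int × Int) :=
  if st.2 = some p then st else (st.1 + 1, some p)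

def countHousesWithRobot_alt (input_data : String) : Int :=
  let pts : List (Int × Int) := ((0, 0) : Int × Int) :: pathPairs input_data.toList (0, 0) (0, 0)
  -- pts.sort(): Python sorts pairs of ints lexicographically = the order of Lex (Int × Int)
  let sortedPts := PySem.List.sorted pts (fun p => toLex p)
  (sortedPts.foldl scanStep (0, none)).1

-- ===== PRECONDITION & SPEC =====
-- Pre_ excludes exactly the strings containing a character other than '>', 'v', '<', '^':
-- on those Python A raises TypeError (subscripting None from moves.get).
def Pre_countHousesWithRobot (input_data : String) : Prop :=
  input_data.toList.all (fun c => c == '>' || c == 'v' || c == '<' || c == '^') = true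
instance (input_data : String) : Decidable (Pre_countHousesWithRobot input_data) := by
  unfold Pre_countHousesWithRobot; infer_instance

def pvWitness_countHousesWithRobot : String := "^v<>v"

def Spec_countHousesWithRobot (input_data : String) (out : Int) : Prop := out = countHousesWithRobot_alt input_data
instance (input_data : String) (out : Int) : Decidable (Spec_countHousesWithRobot input_data out) := by unfold Spec_countHousesWithRobot; infer_instance

-- ===== CLAIM (what is proved, stated in full; the proofs are below) =====
def Claim_equal_countHousesWithRobot : Prop := ∀ (input_data : String), Dom_countHousesWithRobot input_data → Pre_countHousesWithRobot input_data → Spec_countHousesWithRobot input_data (countHousesWithRobot input_data)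

-- ===== LEMMAS AND PROOFS =====

-- positions visited, in order, walking `stream` from p (proof-only)
def walkPos : (Int × Int) → List Char → List (Int × Int)
  | _, [] => []
  | p, m :: t =>
    let d := moveD m
    let q := (p.1 + d.1, p.2 + d.2)
    q :: walkPos q t

-- every other element, starting with (b = true) or skipping (b = false) the head (proof-only)
def everyOther : Bool → List Char → List Char
  | _, [] => []
  | true, a :: t => a :: everyOther false t
  | false, _ :: t => everyOther true t

lemma mod_two_step (k : Int) : PySem.Int.mod (k + 1) 2 = 0 ↔ ¬ PySem.Int.mod k 2 = 0 := by
  rw [PySem.Int.mod_eq_emod_of_pos (by omega : (0:Int) < 2), PySem.Int.mod_eq_emod_of_pos (by omega : (0:Int) < 2)]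
  omega

lemma mem_foldA (cs : List Char) (d : PySem.Dict (Int × Int) Int) (s r : Int × Int)
    (k : Int) (q : Int × Int) :
    q ∈ (cs.foldl stepA (d, s, r, k)).1.keys ↔
      q ∈ d.keys ∨
        (if PySem.Int.mod k 2 = 0 then
          q ∈ walkPos s (everyOther true cs) ∨ q ∈ walkPos r (everyOther false cs)
        else
          q ∈ walkPos r (everyOther true cs) ∨ q ∈ walkPos s (everyOther false cs)) := by
  induction cs generalizing d s r k with
  | nil =>
    simp only [List.foldl_nil]
    split_ifs <;> simp [walkPos, everyOther]
  | cons a t ih =>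
    have hstep := mod_two_step k
    by_cases hk : PySem.Int.mod k 2 = 0
    · have hk1 : ¬ PySem.Int.mod (k + 1) 2 = 0 := by rw [hstep]; exact not_not_intro hk
      simp only [List.foldl_cons, stepA, hk, if_pos, ih, hk1, moveD,
        PySem.Dict.mem_keys_insert, everyOther, walkPos, List.mem_cons, if_false]
      tauto
    · have hk1 : PySem.Int.mod (k + 1) 2 = 0 := hstep.mpr hk
      simp only [List.foldl_cons, stepA, hk, ih, hk1, if_pos, if_false, moveD,
        PySem.Dict.mem_keys_insert, everyOther, walkPos, List.mem_cons]
      tauto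

lemma nodup_foldA (cs : List Char) (d : PySem.Dict (Int × Int) Int) (s r : Int × Int)
    (k : Int) (h : d.keys.Nodup) : (cs.foldl stepA (d, s, r, k)).1.keys.Nodup := by
  induction cs generalizing d s r k with
  | nil => exact h
  | cons a t ih =>
    simp only [List.foldl_cons, stepA]
    split_ifs <;> exact ih _ _ _ _ (PySem.Dict.nodup_keys_insert _ _ _ h)

-- B's pair-consuming walk visits exactly the positions of the two parity walks
lemma mem_pathPairs (cs : List Char) (s r : Int × Int) (q : Int × Int) :
    q ∈ pathPairs cs s r ↔
      q ∈ walkPos s (everyOther true cs) ∨ q ∈ walkPos r (everyOther false cs) := by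
  induction cs, s, r using pathPairs.induct with
  | case1 _ _ => simp [pathPairs, everyOther, walkPos]
  | case2 c s' r' => simp [pathPairs, everyOther, walkPos]
  | case3 c1 c2 t s r s' r' ih =>
    simp only [pathPairs, everyOther, walkPos, List.mem_cons]
    rw [ih]
    tauto

-- the adjacent-changes scan over a sorted (pairwise-≤) list counts its distinct elements
lemma card_insert_erase (b : Int × Int) (s : Finset (Int × Int)) :
    (insert b s).card = (s.erase b).card + 1 := by
  by_cases hbs : b ∈ s
  · rw [Finset.card_insert_of_mem hbs, Finset.card_erase_of_mem hbs]
    have := Finset.card_pos.mpr ⟨b, hbs⟩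
    omega
  · rw [Finset.card_insert_of_notMem hbs, Finset.erase_eq_of_notMem hbs]

lemma scan_aux (t : List (Int × Int)) (a : Int × Int) (c : Int)
    (hp : t.Pairwise (fun x y => toLex x ≤ toLex y))
    (ha : ∀ x ∈ t, toLex a ≤ toLex x) :
    (t.foldl scanStep (c, some a)).1 = c + ((t.toFinset.erase a).card : Int) := by
  induction t generalizing a c with
  | nil => simp
  | cons b t' ih =>
    have hb : ∀ x ∈ t', toLex b ≤ toLex x := (List.pairwise_cons.mp hp).1
    have hp' := (List.pairwise_cons.mp hp).2
    rw [List.foldl_cons]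
    by_cases hba : b = a
    · subst hba
      rw [show scanStep (c, some b) b = (c, some b) from if_pos rfl]
      rw [ih b c hp' hb]
      rw [List.toFinset_cons, Finset.erase_insert_eq_erase]
    · rw [show scanStep (c, some a) b = (c + 1, some b) from
        if_neg (by simp only [Option.some_inj]; exact fun h => hba h.symm)]
      rw [ih b (c + 1) hp' hb]
      have hanot : a ∉ t' := by
        intro hmem
        have h1 : toLex a ≤ toLex b := ha b List.mem_cons_self
        have h2 : toLex b ≤ toLex a := hb a hmem
        exact hba (toLex_inj.mp (le_antisymm h2 h1))
      have herase : ((b :: t').toFinset.erase a) = insert b t'.toFinset := by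
        rw [List.toFinset_cons]
        exact Finset.erase_eq_of_notMem (by
          simp only [Finset.mem_insert, List.mem_toFinset]
          exact fun h => h.elim (fun h1 => hba h1.symm) hanot)
      rw [herase, card_insert_erase]
      push_cast
      ring

lemma scan_top (S : List (Int × Int))
    (hp : S.Pairwise (fun x y => toLex x ≤ toLex y)) :
    (S.foldl scanStep (0, none)).1 = (S.toFinset.card : Int) := by
  cases S with
  | nil => simp
  | cons a t =>
    have hb : ∀ x ∈ t, toLex a ≤ toLex x := (List.pairwise_cons.mp hp).1
    have hp' := (List.pairwise_cons.mp hp).2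
    rw [List.foldl_cons,
      show scanStep (0, none) a = (0 + 1, some a) from if_neg (by simp)]
    rw [scan_aux t a (0 + 1) hp' hb]
    rw [List.toFinset_cons, card_insert_erase]
    push_cast
    ring

-- ===== VERDICT (by name: the statement is the Claim_ definition above) =====
theorem countHousesWithRobot_spec : Claim_equal_countHousesWithRobot := by
  intro input_data _ _
  unfold Spec_countHousesWithRobot countHousesWithRobot countHousesWithRobot_alt
  set cs := input_data.toList with hcs
  set K := (cs.foldl stepA (PySem.Dict.empty.insert (0, 0) 0, (0, 0), (0, 0), 0)).1.keys with hK
  set pts : List (Int × Int) := ((0, 0) : Int × Int) :: pathPairs cs (0, 0) (0, 0) with hpts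
  set S := PySem.List.sorted pts (fun p => toLex p) with hS
  have hpair : S.Pairwise (fun x y => toLex x ≤ toLex y) :=
    PySem.List.sorted_pairwise pts (fun p => toLex p)
  rw [scan_top S hpair]
  have hKnodup : K.Nodup := nodup_foldA _ _ _ _ _ (by decide)
  have h0 : PySem.Int.mod (0 : Int) 2 = 0 := by decide
  have hsetseq : K.toFinset = S.toFinset := by
    ext q
    simp only [List.mem_toFinset, hK, hS, PySem.List.mem_sorted, hpts, List.mem_cons,
      mem_pathPairs, mem_foldA, h0, if_true, PySem.Dict.mem_keys_insert,
      PySem.Dict.keys_empty, List.not_mem_nil, or_false]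
  have hlen : K.length = S.toFinset.card := by
    rw [← hsetseq]
    exact (List.toFinset_card_of_nodup hKnodup).symm
  have hsize : PySem.Dict.size (cs.foldl stepA
      (PySem.Dict.empty.insert (0, 0) 0, (0, 0), (0, 0), 0)).1 = K.length := by
    rw [hK]
    simp [PySem.Dict.size, PySem.Dict.keys]
  show ((cs.foldl stepA (PySem.Dict.empty.insert (0, 0) 0, (0, 0), (0, 0), 0)).1.size : Int)
      = (S.toFinset.card : Int)
  rw [hsize, hlen]
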